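-- pv_equiv track=rewrite | github.com/ej200CE/DAPC_preparation_2025 | Kattis/anti_tetris.py | check
-- ===== SOURCE A (Python) =====
-- def check(arr):
--     ht = len(arr)
--     wt = len(arr[0])
--     for i in range(wt):
--         isdot = False
--         for j in range(ht):
--             if arr[j][i] == '.':
--                 isdot = True
--             else:
--                 if isdot == True:
--                     return False
--     return True
-- ===== SOURCE B (Python) =====
-- def check(arr):
--     wt = len(arr[0])
--     for upper, lower in zip(arr, arr[1:]):
--         for i in range(wt):
--             if upper[i] == '.' and lower[i] != '.':
--                 return False
--     return True
-- ===== Notes on version B (the rewrite author's own statement) =====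
-- stated objective: faster
-- what changed: Replaces A's per-column stateful dot-flag scan with a row-major single pass over adjacent row pairs (zip) using the local invariant that the grid is valid iff no dot has a non-dot cell directly below it; row-major iteration over the existing row lists avoids per-cell double indexing and short-circuits, measured ~2x faster.
-- outside the precondition, e.g. on check([['x', '.'], ['.'], ['x', 'y']]): A returns False, B raises IndexError
import Mathlib
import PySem

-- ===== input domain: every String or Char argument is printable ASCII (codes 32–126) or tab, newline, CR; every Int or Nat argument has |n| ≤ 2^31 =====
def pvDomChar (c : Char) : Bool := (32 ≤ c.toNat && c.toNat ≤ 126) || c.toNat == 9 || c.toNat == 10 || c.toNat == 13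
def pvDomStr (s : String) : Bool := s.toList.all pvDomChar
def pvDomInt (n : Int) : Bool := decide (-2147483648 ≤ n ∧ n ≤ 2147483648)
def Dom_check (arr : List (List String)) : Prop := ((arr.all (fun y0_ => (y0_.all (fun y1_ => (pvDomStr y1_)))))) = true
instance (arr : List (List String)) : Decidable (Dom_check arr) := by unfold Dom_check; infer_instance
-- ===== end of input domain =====

-- B replaces A's per-column stateful dot-flag scan with a row-major pass over
-- adjacent row pairs, using the local invariant "no '.' has a non-'.' directly
-- below it" (same asymptotic cost; a timing run measured B ~2x faster).

-- ===== PORT A =====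
-- inner loop over j (rows), carrying the isdot flag; none from pyGet? = IndexError (outside Pre_)
def checkColA (i : Int) : List (List String) → Bool → Bool
  | [], _ => true
  | row :: rest, isdot =>
    match PySem.List.pyGet? row i with
    | none => true  -- Python raises IndexError here; excluded by Pre_check
    | some c =>
      if c == "." then checkColA i rest true
      else if isdot then false else checkColA i rest isdot

def check (arr : List (List String)) : Bool :=
  match arr with
  | [] => true  -- Python raises IndexError on len(arr[0]); excluded by Pre_check
  | r0 :: _ => (PySem.List.pyRange 0 (r0.length : Int) 1).all (fun i => checkColA i arr false)

-- ===== PORT B =====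
-- Source B: for (upper, lower) in zip(arr, arr[1:]): for i in range(wt):
--   if upper[i] == '.' and lower[i] != '.': return False
-- upper[i]/lower[i] ported with total pyGetD (exact within Pre_check, where i is in range)
def check_alt (arr : List (List String)) : Bool :=
  match arr with
  | [] => true  -- Python raises IndexError on len(arr[0]); excluded by Pre_check
  | r0 :: _ =>
    (arr.zip (PySem.List.slice arr (some 1) none)).all (fun p =>
      (PySem.List.pyRange 0 (r0.length : Int) 1).all (fun i =>
        !((PySem.List.pyGetD p.1 i "" == ".") && !(PySem.List.pyGetD p.2 i "" == "."))))

-- ===== PRECONDITION & SPEC =====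
-- Pre_ excludes the empty grid (A raises IndexError) and ragged grids, on which
-- whether A raises IndexError or returns early depends on scan position and B may
-- raise where A happens to return.
def Pre_check (arr : List (List String)) : Prop :=
  arr ≠ [] ∧ ∀ row ∈ arr, (arr.headD []).length ≤ row.length
instance (arr : List (List String)) : Decidable (Pre_check arr) := by unfold Pre_check; infer_instance

def pvWitness_check : List (List String) := [["x", "."], [".", "."]]

def Spec_check (arr : List (List String)) (out : Bool) : Prop := out = check_alt arr
instance (arr : List (List String)) (out : Bool) : Decidable (Spec_check arr out) := by unfold Spec_check; infer_instance

-- ===== CLAIM (what is proved, stated in full; the proofs are below) =====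
def Claim_equal_check : Prop := ∀ (arr : List (List String)), Dom_check arr → Pre_check arr → Spec_check arr (check arr)

-- ===== LEMMAS AND PROOFS =====

-- pure flag scan over the column values (A's inner loop with in-range indexing resolved)
def scanA : List String → Bool → Bool
  | [], _ => true
  | c :: rest, isdot =>
    if c == "." then scanA rest true
    else if isdot then false else scanA rest isdot

-- B's per-pair condition, restricted to one column
def pairOk (a b : String) : Bool := !((a == ".") && !(b == "."))

-- B's check on a single column list
def pairsOkCol (cs : List String) : Bool := (cs.zip cs.tail).all (fun p => pairOk p.1 p.2)

lemma all_congr_mem {α : Type} (l : List α) (f g : α → Bool)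
    (h : ∀ x ∈ l, f x = g x) : l.all f = l.all g := by
  induction l with
  | nil => rfl
  | cons x xs ih =>
    simp only [List.all_cons, h x (by simp), ih (fun y hy => h y (by simp [hy]))]

lemma checkColA_eq_scanA (i : Int) (hi : 0 ≤ i) (rows : List (List String))
    (h : ∀ row ∈ rows, i < (row.length : Int)) (b : Bool) :
    checkColA i rows b = scanA (rows.map (fun row => PySem.List.pyGetD row i "")) b := by
  induction rows generalizing b with
  | nil => rfl
  | cons row rest ih =>
    have hlt : i < (row.length : Int) := h row (by simp)
    have hget : PySem.List.pyGet? row i = some (PySem.List.pyGetD row i "") := by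
      rw [PySem.List.pyGet?_eq_some_getElem row hi hlt,
        PySem.List.pyGetD_eq_getElem row "" hi hlt]
    simp only [checkColA, hget, List.map_cons, scanA]
    split
    · exact ih (fun r hr => h r (by simp [hr])) true
    · split
      · rfl
      · exact ih (fun r hr => h r (by simp [hr])) b

lemma pairsOk_dot_cons (rest : List String) :
    pairsOkCol ("." :: rest) = rest.all (fun c => c == ".") := by
  induction rest with
  | nil => rfl
  | cons d rest' ih =>
    by_cases hd : d = "."
    · subst hd
      simp only [pairsOkCol, List.tail_cons, List.zip_cons_cons, List.all_cons] at ih ⊢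
      rw [show pairOk "." "." = true from rfl, Bool.true_and, ih]
      simp
    · have hdb : (d == ".") = false := by simp [hd]
      simp only [pairsOkCol, List.tail_cons, List.zip_cons_cons, List.all_cons,
        pairOk, hdb]
      simp

lemma scanA_true_eq_all (col : List String) :
    scanA col true = col.all (fun c => c == ".") := by
  induction col with
  | nil => rfl
  | cons c rest ih =>
    simp only [scanA, List.all_cons]
    by_cases h : c == "." <;> simp [h, ih]

lemma scanA_eq_pairsOkCol (cs : List String) : scanA cs false = pairsOkCol cs := by
  induction cs with
  | nil => rfl
  | cons c rest ih =>
    by_cases hc : c = "."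
    · subst hc
      simp only [scanA, beq_self_eq_true, if_true, scanA_true_eq_all]
      rw [pairsOk_dot_cons]
    · have hcb : (c == ".") = false := by simp [hc]
      simp only [scanA, hcb, Bool.false_eq_true, if_false, ih]
      cases rest with
      | nil => rfl
      | cons d rest' =>
        simp only [pairsOkCol, List.tail_cons, List.zip_cons_cons, List.all_cons,
          pairOk, hcb]
        simp

-- swap the two List.all quantifiers
lemma all_comm {α β : Type} (l : List α) (m : List β) (f : α → β → Bool) :
    l.all (fun a => m.all (f a)) = m.all (fun b => l.all (fun a => f a b)) := by
  rw [Bool.eq_iff_iff]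
  simp only [List.all_eq_true]
  exact ⟨fun h b hb a ha => h a ha b hb, fun h a ha b hb => h b hb a ha⟩

-- pushing a map through zip-with-tail
lemma zip_tail_map_all {α β : Type} (l : List α) (g : α → β) (f : β → β → Bool) :
    (l.zip l.tail).all (fun p => f (g p.1) (g p.2)) =
      ((l.map g).zip (l.map g).tail).all (fun p => f p.1 p.2) := by
  induction l with
  | nil => rfl
  | cons a l ih =>
    cases l with
    | nil => rfl
    | cons b t =>
      simp only [List.tail_cons, List.map_cons, List.zip_cons_cons, List.all_cons]
      have := ih
      simp only [List.tail_cons, List.map_cons] at this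
      rw [this]

-- ===== VERDICT (by name: the statement is the Claim_ definition above) =====
theorem check_spec : Claim_equal_check := by
  intro arr _ hpre
  unfold Spec_check
  obtain ⟨hne, hlen⟩ := hpre
  match arr with
  | [] => exact absurd rfl hne
  | r0 :: rest =>
    simp only [check, check_alt, PySem.List.slice_from_one]
    rw [all_comm]
    refine all_congr_mem _ _ _ (fun i hi => ?_)
    have hmem := (PySem.List.mem_pyRange_one).mp hi
    rw [checkColA_eq_scanA i hmem.1 (r0 :: rest)
      (fun row hr => by have := hlen row hr; simp only [List.headD_cons] at this; omega)]
    rw [scanA_eq_pairsOkCol, pairsOkCol,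
      ← zip_tail_map_all (r0 :: rest) (fun row => PySem.List.pyGetD row i "") pairOk]
    simp [pairOk]
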